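-- pv_equiv track=rewrite | github.com/ederror/algorithm-study | Programmers/불량 사용자.py | solution
-- ===== SOURCE A (Python) =====
-- def solution(user_id, banned_id):
--     def backTrack(caseList, i):
--         if i == len(banned_id):
--             caseList.sort()
--             for ans in answer: # 중복 확인
--                 if ans == caseList:
--                     return
--             answer.append(caseList) # 중복 없으면 답에 추가
--             return
--
--         for x in candidates[i]:
--             if x not in caseList:
--                 caseList.append(x)
--                 caseListCopy = [i for i in caseList]
--                 backTrack(caseListCopy, i+1)
--                 caseList.pop()
--
--     answer = []
--     candidates = []
--     for bid in banned_id: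
--         candidate = []
--         for uid in user_id:
--             if len(bid) != len(uid):
--                 continue
--
--             flag = True
--             for i in range(len(bid)):
--                 if bid[i] != '*' and uid[i] != bid[i]:
--                     flag = False
--                     break
--
--             if flag:
--                 candidate.append(uid)
--         candidates.append(candidate)
--
--     backTrack([], 0)
--
--     return len(answer)
-- ===== SOURCE B (Python) =====
-- def solution(user_id, banned_id):
--     candidates = [
--         [u for u in user_id
--          if len(u) == len(b) and all(bc == '*' or uc == bc for bc, uc in zip(b, u))]
--         for b in banned_id
--     ]
--     combos = [[]]
--     for cand in candidates:
--         combos = [c + [x] for c in combos for x in cand if x not in c]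
--     return len({tuple(sorted(c)) for c in combos})
-- ===== Notes on version B (the rewrite author's own statement) =====
-- stated objective: idiomatic
-- what changed: A's recursive backTrack with a quadratic linear-scan dedup of the answer list is replaced by an iterative level-by-level build of the pruned cartesian product of the candidate lists (a comprehension per banned id) followed by deduplication through a set of sorted tuples.
import Mathlib
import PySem

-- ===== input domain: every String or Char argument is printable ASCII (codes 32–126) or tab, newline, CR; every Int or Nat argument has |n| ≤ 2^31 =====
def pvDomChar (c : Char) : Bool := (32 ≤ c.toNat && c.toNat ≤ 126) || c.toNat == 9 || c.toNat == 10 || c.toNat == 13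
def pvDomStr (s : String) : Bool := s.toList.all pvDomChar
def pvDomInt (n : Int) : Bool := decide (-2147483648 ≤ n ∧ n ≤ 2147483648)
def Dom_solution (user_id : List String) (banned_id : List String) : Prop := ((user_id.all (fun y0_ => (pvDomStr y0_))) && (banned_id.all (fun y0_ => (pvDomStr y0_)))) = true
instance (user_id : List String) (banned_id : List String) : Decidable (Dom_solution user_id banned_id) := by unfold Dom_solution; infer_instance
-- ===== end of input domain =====

-- B replaces A's recursive backTrack (with its quadratic answer-list dedup) by an iterative
-- level-by-level product build over the candidate lists, deduplicated at the end through a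
-- set of sorted tuples; objective: idiomatic.

-- ===== PORT A =====
-- A's inner index loop with flag/break over range(len(bid)), run only when the lengths are
-- equal; transliterated as the structural recursion over the two char lists (exact: same
-- positions compared, same early exit).
def pvMatchA : List Char → List Char → Bool
  | b :: bs, u :: us => if b != '*' && u != b then false else pvMatchA bs us
  | _, _ => true

-- the 'for uid in user_id: … candidate.append(uid)' loop
def pvCandA (user_id : List String) (bid : String) : List String :=
  user_id.foldl (fun cand uid =>
    if bid.toList.length != uid.toList.length then cand
    else if pvMatchA bid.toList uid.toList then cand ++ [uid] else cand) []

-- backTrack(caseList, i): candidates has length len(banned_id), so 'i == len(banned_id)'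
-- is exactly 'the suffix candidates[i:] is empty'; the third argument is that suffix.
def pvBT (answer : List (List String)) (caseList : List String) : List (List String) → List (List String)
  | [] =>
      let s := PySem.List.sorted caseList (fun x => x) false
      if answer.contains s then answer else answer ++ [s]
  | c :: rest =>
      c.foldl (fun ans x =>
        if caseList.contains x then ans else pvBT ans (caseList ++ [x]) rest) answer

def solution (user_id : List String) (banned_id : List String) : Int :=
  let candidates := banned_id.foldl (fun cs bid => cs ++ [pvCandA user_id bid]) []
  Int.ofNat (pvBT [] [] candidates).length

-- ===== PORT B =====
-- 'len(u) == len(b) and all(bc == '*' or uc == bc for bc, uc in zip(b, u))'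
def pvMatchB (b u : String) : Bool :=
  b.toList.length == u.toList.length &&
  ((b.toList.zip u.toList).all fun p => p.1 == '*' || p.2 == p.1)

def solution_alt (user_id : List String) (banned_id : List String) : Int :=
  let candidates := banned_id.map (fun b => user_id.filter (fun u => pvMatchB b u))
  let combos := candidates.foldl
    (fun acc c => acc.flatMap (fun comb =>
      (c.filter (fun x => !comb.contains x)).map (fun x => comb ++ [x]))) [[]]
  Int.ofNat (PySem.Set.ofList
    (combos.map (fun c => PySem.List.sorted c (fun x => x) false))).length

-- ===== PRECONDITION & SPEC =====
def Spec_solution (user_id : List String) (banned_id : List String) (out : Int) : Prop := out = solution_alt user_id banned_id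
instance (user_id : List String) (banned_id : List String) (out : Int) : Decidable (Spec_solution user_id banned_id out) := by unfold Spec_solution; infer_instance

-- ===== CLAIM (what is proved, stated in full; the proofs are below) =====
def Claim_equal_solution : Prop := ∀ (user_id : List String) (banned_id : List String), Dom_solution user_id banned_id → Spec_solution user_id banned_id (solution user_id banned_id)

-- ===== LEMMAS AND PROOFS =====

-- sorted completions of caseList through the remaining candidate lists, in A's DFS order
def extA : List (List String) → List String → List (List String)
  | [], caseList => [PySem.List.sorted caseList (fun x => x) false]
  | c :: rest, caseList =>
      c.flatMap (fun x => if caseList.contains x then [] else extA rest (caseList ++ [x]))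

-- the cartesian product of the candidate lists, first list slowest
def prodR : List (List String) → List (List String)
  | [] => [[]]
  | c :: rest => c.flatMap (fun x => (prodR rest).map (x :: ·))

theorem matchA_eq (bs us : List Char) :
    pvMatchA bs us = (bs.zip us).all (fun p => p.1 == '*' || p.2 == p.1) := by
  induction bs generalizing us with
  | nil => simp [pvMatchA]
  | cons b bs ih =>
    cases us with
    | nil => simp [pvMatchA]
    | cons u us =>
      simp only [pvMatchA, List.zip_cons_cons, List.all_cons, ih]
      by_cases hb : b = '*' <;> by_cases hu : u = b <;> simp [hb, hu]

theorem candA_eq (user_id : List String) (bid : String) :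
    pvCandA user_id bid = user_id.filter (fun u => pvMatchB bid u) := by
  unfold pvCandA
  have hfun : (fun (cand : List String) (uid : String) =>
      if bid.toList.length != uid.toList.length then cand
      else if pvMatchA bid.toList uid.toList then cand ++ [uid] else cand)
      = fun cand uid => if pvMatchB bid uid then cand ++ [uid] else cand := by
    funext cand uid
    simp only [pvMatchB, matchA_eq]
    by_cases hl : bid.toList.length = uid.toList.length <;>
      by_cases hm : (bid.toList.zip uid.toList).all (fun p => p.1 == '*' || p.2 == p.1) = true <;>
      simp [hl, hm]
  rw [hfun, PySem.List.foldl_append_if_eq_filter]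
  simp

theorem bt_eq (rest : List (List String)) (caseList : List String) (answer : List (List String)) :
    pvBT answer caseList rest = (extA rest caseList).foldl PySem.Set.add answer := by
  induction rest generalizing caseList answer with
  | nil =>
    simp only [pvBT, extA, List.foldl_cons, List.foldl_nil]
    rw [PySem.Set.add_eq_ite]
    simp [List.contains_eq_mem]
  | cons c rest ih =>
    simp only [pvBT, extA, List.foldl_flatMap]
    apply PySem.List.foldl_congr_mem
    intro ans x _
    by_cases hx : x ∈ caseList
    · simp [List.contains_eq_mem, hx]
    · simp only [List.contains_eq_mem, hx, decide_false, Bool.false_eq_true, if_false]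
      exact ih _ _

theorem mem_extA (rest : List (List String)) (caseList : List String) (s : List String)
    (hnd : caseList.Nodup) :
    s ∈ extA rest caseList ↔
      ∃ c ∈ prodR rest, (caseList ++ c).Nodup ∧ s = PySem.List.sorted (caseList ++ c) (fun x => x) false := by
  induction rest generalizing caseList with
  | nil =>
    simp [extA, prodR, hnd]
  | cons c rest ih =>
    have hsplit : ∀ (x : String) (t : List String),
        caseList ++ x :: t = (caseList ++ [x]) ++ t := by intro x t; simp
    simp only [extA, prodR, List.mem_flatMap]
    constructor
    · rintro ⟨x, hxc, hs⟩
      by_cases hx : x ∈ caseList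
      · simp [List.contains_eq_mem, hx] at hs
      · simp only [List.contains_eq_mem, hx, decide_false, Bool.false_eq_true, if_false] at hs
        have hnd' : (caseList ++ [x]).Nodup := by
          simp [List.nodup_append, hnd]
          intro a ha hb; exact hx (hb ▸ ha)
        obtain ⟨t, ht, hndt, hst⟩ := (ih (caseList ++ [x]) hnd').1 hs
        refine ⟨x :: t, ⟨x, hxc, List.mem_map_of_mem ht⟩, ?_, ?_⟩
        · rw [hsplit]; exact hndt
        · rw [hsplit]; exact hst
    · rintro ⟨comb, ⟨x, hxc, hmem⟩, hndc, hsc⟩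
      obtain ⟨t, ht, rfl⟩ := List.mem_map.1 hmem
      rw [hsplit] at hndc hsc
      have hx : x ∉ caseList := by
        intro hmemc
        rw [List.nodup_append, List.nodup_append] at hndc
        exact hndc.1.2.2 x hmemc x (List.mem_singleton.2 rfl) rfl
      have hnd' : (caseList ++ [x]).Nodup := by
        simp [List.nodup_append, hnd]
        intro a ha hb; exact hx (hb ▸ ha)
      refine ⟨x, hxc, ?_⟩
      simp only [List.contains_eq_mem, hx, decide_false, Bool.false_eq_true, if_false]
      exact (ih (caseList ++ [x]) hnd').2 ⟨t, ht, hndc, hsc⟩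


-- 'x not in c' pruning along a combo: each element fresh w.r.t. the prefix
def freshB (p : List String) : List String → Bool
  | [] => true
  | x :: t => !p.contains x && freshB (p ++ [x]) t

theorem freshB_iff : ∀ (t p : List String), p.Nodup → (freshB p t = true ↔ (p ++ t).Nodup)
  | [], p, hnd => by simp [freshB, hnd]
  | x :: t, p, hnd => by
    have hsplit : p ++ x :: t = (p ++ [x]) ++ t := by simp
    simp only [freshB, Bool.and_eq_true, Bool.not_eq_true', List.contains_eq_mem,
      decide_eq_false_iff_not]
    by_cases hx : x ∈ p
    · constructor
      · rintro ⟨h, -⟩; exact absurd hx h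
      · intro h
        exfalso
        rw [hsplit, List.nodup_append, List.nodup_append] at h
        exact h.1.2.2 x hx x (List.mem_singleton.2 rfl) rfl
    · have hnd' : (p ++ [x]).Nodup := by
        simp [List.nodup_append, hnd]
        intro a ha hb; exact hx (hb ▸ ha)
      rw [freshB_iff t (p ++ [x]) hnd', hsplit]
      simp [hx]

theorem mem_foldB : ∀ (cands acc : List (List String)) (s : List String),
    (s ∈ cands.foldl (fun acc c => acc.flatMap (fun comb =>
        (c.filter (fun x => !comb.contains x)).map (fun x => comb ++ [x]))) acc
      ↔ ∃ p ∈ acc, ∃ t ∈ prodR cands, freshB p t = true ∧ s = p ++ t) := by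
  intro cands
  induction cands with
  | nil =>
    intro acc s
    simp only [List.foldl_nil, prodR, List.mem_singleton]
    constructor
    · intro h; exact ⟨s, h, [], rfl, rfl, by simp⟩
    · rintro ⟨p, hp, t, rfl, -, rfl⟩; simpa using hp
  | cons c rest ih =>
    intro acc s
    rw [List.foldl_cons, ih]
    constructor
    · rintro ⟨p', hp', t, ht, hf, rfl⟩
      rw [List.mem_flatMap] at hp'
      obtain ⟨p, hp, hmem⟩ := hp'
      obtain ⟨x, hx, rfl⟩ := List.mem_map.1 hmem
      rw [List.mem_filter] at hx
      refine ⟨p, hp, x :: t, ?_, ?_, by simp⟩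
      · simp only [prodR, List.mem_flatMap]
        exact ⟨x, hx.1, List.mem_map_of_mem ht⟩
      · simp only [freshB, Bool.and_eq_true]
        exact ⟨hx.2, hf⟩
    · rintro ⟨p, hp, t, ht, hf, rfl⟩
      simp only [prodR, List.mem_flatMap] at ht
      obtain ⟨x, hx, hmem⟩ := ht
      obtain ⟨t', ht', rfl⟩ := List.mem_map.1 hmem
      simp only [freshB, Bool.and_eq_true] at hf
      refine ⟨p ++ [x], ?_, t', ht', hf.2, by simp⟩
      rw [List.mem_flatMap]
      exact ⟨p, hp, List.mem_map.2 ⟨x, List.mem_filter.2 ⟨hx, hf.1⟩, rfl⟩⟩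

theorem cands_common (user_id banned_id : List String) :
    banned_id.foldl (fun cs bid => cs ++ [pvCandA user_id bid]) []
      = banned_id.map (fun b => user_id.filter (fun u => pvMatchB b u)) := by
  rw [PySem.List.foldl_append_singleton_eq_map]
  simp only [List.nil_append]
  exact List.map_congr_left (fun b _ => candA_eq user_id b)

theorem sets_len_eq {L1 L2 : List (List String)} (h : ∀ s, s ∈ L1 ↔ s ∈ L2) :
    (PySem.Set.ofList L1).length = (PySem.Set.ofList L2).length := by
  have hp : (PySem.Set.ofList L1).Perm (PySem.Set.ofList L2) := by
    rw [List.perm_ext_iff_of_nodup (PySem.Set.nodup_ofList L1) (PySem.Set.nodup_ofList L2)]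
    intro a
    rw [PySem.Set.mem_ofList, PySem.Set.mem_ofList]
    exact h a
  exact hp.length_eq

theorem main_eq (user_id banned_id : List String) :
    solution user_id banned_id = solution_alt user_id banned_id := by
  simp only [solution, solution_alt, cands_common]
  rw [bt_eq, ← PySem.Set.ofList_eq_foldl]
  congr 1
  apply sets_len_eq
  intro s
  rw [mem_extA _ _ _ List.nodup_nil]
  simp only [List.nil_append, List.mem_map]
  constructor
  · rintro ⟨c, hc, hnd, rfl⟩
    refine ⟨c, ?_, rfl⟩
    rw [mem_foldB]
    exact ⟨[], List.mem_singleton.2 rfl, c, hc,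
      (freshB_iff c [] List.nodup_nil).2 (by simpa using hnd), by simp⟩
  · rintro ⟨cb, hcb, rfl⟩
    rw [mem_foldB] at hcb
    obtain ⟨p, hp, t, ht, hf, rfl⟩ := hcb
    have hp' : p = [] := List.mem_singleton.1 hp
    subst hp'
    exact ⟨t, ht, by simpa using (freshB_iff t [] List.nodup_nil).1 hf, by simp⟩

-- ===== VERDICT (by name: the statement is the Claim_ definition above) =====
theorem solution_spec : Claim_equal_solution := by
  intro user_id banned_id _
  exact main_eq user_id banned_id
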